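-- pv_equiv track=rewrite | github.com/PCART-tools/PCART | Preprocess/preprocess.py | countBracket
-- ===== SOURCE A (Python) =====
-- def countBracket(s):
--     minL=0
--     minR=0
--     midL=0
--     midR=0
--     huaL=0
--     huaR=0
--     flag=1
--     cnt=0 #计算引号的个数
--     for it in s:
--         if it=='\'': #引号内的括号不计数
--             flag=0
--             cnt+=1
--             if cnt%2==0:
--                 flag=1
--         elif flag==1:
--             if it=='(':
--                 minL+=1
--             elif it==')':
--                 minR+=1
--             elif it=='[':
--                 midL+=1
--             elif it==']':
--                 midR+=1
--             elif it=='{':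
--                 huaL+=1
--             elif it=='}':
--                 huaR+=1
--     return minL,minR,midL,midR,huaL,huaR
-- ===== SOURCE B (Python) =====
-- def countBracket(s):
--     outside = "".join(s.split("'")[0::2])
--     return (outside.count('('), outside.count(')'), outside.count('['),
--             outside.count(']'), outside.count('{'), outside.count('}'))
-- ===== Notes on version B (the rewrite author's own statement) =====
-- stated objective: simpler
-- what changed: Replaces the stateful flag/quote-parity character scan with split on the quote character, join of the even-indexed (outside-quote) segments, and six .count calls on the joined string.
import Mathlib
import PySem

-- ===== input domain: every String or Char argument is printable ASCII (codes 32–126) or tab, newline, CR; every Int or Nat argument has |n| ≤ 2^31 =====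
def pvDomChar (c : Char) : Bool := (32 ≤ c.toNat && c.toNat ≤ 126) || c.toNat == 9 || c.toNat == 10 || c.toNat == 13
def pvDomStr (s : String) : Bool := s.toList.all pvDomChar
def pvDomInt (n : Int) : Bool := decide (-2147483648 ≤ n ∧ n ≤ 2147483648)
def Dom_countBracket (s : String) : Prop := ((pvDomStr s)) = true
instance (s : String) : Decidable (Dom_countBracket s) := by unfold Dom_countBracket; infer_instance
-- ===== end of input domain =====

-- B replaces A's stateful quote-flag scan by split-on-quote / join even segments / count; objective: simpler.


-- ===== PORT A =====
-- state: (minL, minR, midL, midR, huaL, huaR, flag, cnt)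
def countBracketLoop (l : List Char)
    (st : Int × Int × Int × Int × Int × Int × Int × Int) :
    Int × Int × Int × Int × Int × Int × Int × Int :=
  l.foldl (fun st it =>
    let (minL, minR, midL, midR, huaL, huaR, flag, cnt) := st
    if it = '\'' then
      let flag := (0 : Int)
      let cnt := cnt + 1
      let flag := if PySem.Int.mod cnt 2 = 0 then (1 : Int) else flag
      (minL, minR, midL, midR, huaL, huaR, flag, cnt)
    else if flag = 1 then
      if it = '(' then (minL + 1, minR, midL, midR, huaL, huaR, flag, cnt)
      else if it = ')' then (minL, minR + 1, midL, midR, huaL, huaR, flag, cnt)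
      else if it = '[' then (minL, minR, midL + 1, midR, huaL, huaR, flag, cnt)
      else if it = ']' then (minL, minR, midL, midR + 1, huaL, huaR, flag, cnt)
      else if it = '{' then (minL, minR, midL, midR, huaL + 1, huaR, flag, cnt)
      else if it = '}' then (minL, minR, midL, midR, huaL, huaR + 1, flag, cnt)
      else (minL, minR, midL, midR, huaL, huaR, flag, cnt)
    else (minL, minR, midL, midR, huaL, huaR, flag, cnt)) st

def countBracket (s : String) : Int × Int × Int × Int × Int × Int :=
  let st := countBracketLoop s.toList (0, 0, 0, 0, 0, 0, 1, 0)
  (st.1, st.2.1, st.2.2.1, st.2.2.2.1, st.2.2.2.2.1, st.2.2.2.2.2.1)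

-- ===== PORT B =====
-- pvEvery2 is the slice parts[0::2] (every second element starting at index 0)
def pvEvery2 {α : Type} : List α → List α
  | [] => []
  | [x] => [x]
  | x :: _ :: r => x :: pvEvery2 r

def countBracket_alt (s : String) : Int × Int × Int × Int × Int × Int :=
  let outside := (pvEvery2 (s.toList.splitOn '\'')).flatten
  ((outside.count '(' : Int), (outside.count ')' : Int), (outside.count '[' : Int),
   (outside.count ']' : Int), (outside.count '{' : Int), (outside.count '}' : Int))

-- ===== PRECONDITION & SPEC =====
def Spec_countBracket (s : String) (out : Int × Int × Int × Int × Int × Int) : Prop := out = countBracket_alt s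
instance (s : String) (out : Int × Int × Int × Int × Int × Int) : Decidable (Spec_countBracket s out) := by unfold Spec_countBracket; infer_instance

-- ===== CLAIM (what is proved, stated in full; the proofs are below) =====
def Claim_equal_countBracket : Prop := ∀ (s : String), Dom_countBracket s → Spec_countBracket s (countBracket s)

-- ===== LEMMAS AND PROOFS =====

-- the characters of l outside quotes, given whether we are currently outside (b = true)
def pvOuts : List Char → Bool → List Char
  | [], _ => []
  | c :: l, b =>
    if c = '\'' then pvOuts l (!b)
    else if b then c :: pvOuts l b else pvOuts l b

theorem pvEvery2_cons_cons {α : Type} (x y : α) (r : List α) :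
    pvEvery2 (x :: y :: r) = x :: pvEvery2 r := rfl

-- joining the even segments of splitOn gives the outside-quote characters;
-- joining the odd segments gives the inside-quote characters
theorem flatten_every2_splitOn (l : List Char) :
    (pvEvery2 (l.splitOnP (· == '\''))).flatten = pvOuts l true ∧
    (pvEvery2 (l.splitOnP (· == '\'')).tail).flatten = pvOuts l false := by
  induction l with
  | nil => simp [List.splitOnP_nil, pvEvery2, pvOuts]
  | cons c l ih =>
    obtain ⟨h1, h2⟩ := ih
    obtain ⟨p, r, hpr⟩ := List.exists_cons_of_ne_nil (List.splitOnP_ne_nil (· == '\'') l)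
    by_cases hc : c = '\''
    · subst hc
      rw [List.splitOnP_cons]
      simp only [BEq.rfl, if_pos]
      rw [hpr] at h1 h2 ⊢
      constructor
      · simpa [pvEvery2_cons_cons, pvOuts] using h2
      · simpa [pvEvery2, pvOuts] using h1
    · rw [List.splitOnP_cons, if_neg (by simp [hc])]
      rw [hpr] at h1 h2 ⊢
      constructor
      · cases r with
        | nil =>
          simp only [List.modifyHead, pvEvery2, List.flatten] at h1 ⊢
          simp [pvOuts, hc, ← h1]
        | cons q r' =>
          simp only [List.modifyHead, pvEvery2_cons_cons, List.flatten_cons] at h1 ⊢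
          simp [pvOuts, hc, ← h1]
      · simpa [List.modifyHead, pvOuts, hc] using h2

-- flag in A's loop is determined by the parity of cnt
def pvFlagOf (cnt : Int) : Int := if PySem.Int.mod cnt 2 = 0 then 1 else 0

theorem pvMod_two (a : Int) : PySem.Int.mod a 2 = a % 2 := by
  simp [PySem.Int.mod, Int.fmod_eq_emod]

theorem countBracketLoop_eq (l : List Char) :
    ∀ (m1 m2 m3 m4 m5 m6 cnt : Int),
    countBracketLoop l (m1, m2, m3, m4, m5, m6, pvFlagOf cnt, cnt) =
      (m1 + ((pvOuts l (decide (PySem.Int.mod cnt 2 = 0))).count '(' : Int),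
       m2 + ((pvOuts l (decide (PySem.Int.mod cnt 2 = 0))).count ')' : Int),
       m3 + ((pvOuts l (decide (PySem.Int.mod cnt 2 = 0))).count '[' : Int),
       m4 + ((pvOuts l (decide (PySem.Int.mod cnt 2 = 0))).count ']' : Int),
       m5 + ((pvOuts l (decide (PySem.Int.mod cnt 2 = 0))).count '{' : Int),
       m6 + ((pvOuts l (decide (PySem.Int.mod cnt 2 = 0))).count '}' : Int),
       pvFlagOf (cnt + (l.count '\'' : Int)), cnt + (l.count '\'' : Int)) := by
  induction l with
  | nil => intro m1 m2 m3 m4 m5 m6 cnt; simp [countBracketLoop, pvOuts]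
  | cons c l ih =>
    intro m1 m2 m3 m4 m5 m6 cnt
    by_cases hc : c = '\''
    · subst hc
      have step : countBracketLoop ('\'' :: l) (m1, m2, m3, m4, m5, m6, pvFlagOf cnt, cnt)
          = countBracketLoop l (m1, m2, m3, m4, m5, m6, pvFlagOf (cnt + 1), cnt + 1) := by
        simp [countBracketLoop, pvFlagOf]
      have hpar : decide (PySem.Int.mod (cnt + 1) 2 = 0) = !decide (PySem.Int.mod cnt 2 = 0) := by
        rcases Int.emod_two_eq_zero_or_one cnt with h | h <;>
          · have h1 : (cnt + 1) % 2 = 1 - cnt % 2 := by omega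
            simp [pvMod_two, h1, h]
      have houts : pvOuts ('\'' :: l) (decide (PySem.Int.mod cnt 2 = 0))
          = pvOuts l (!decide (PySem.Int.mod cnt 2 = 0)) := by simp [pvOuts]
      have harg : cnt + 1 + (l.count '\'' : Int) = cnt + ((l.count '\'' : Int) + 1) := by ring
      rw [step, ih, hpar, houts, harg]
      simp [List.count_cons]
    · have houts : pvOuts (c :: l) (decide (PySem.Int.mod cnt 2 = 0))
          = (if PySem.Int.mod cnt 2 = 0 then [c] else []) ++ pvOuts l (decide (PySem.Int.mod cnt 2 = 0)) := by
        by_cases h : PySem.Int.mod cnt 2 = 0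
        · rw [if_pos h]
          have hd : decide (PySem.Int.mod cnt 2 = 0) = true := decide_eq_true h
          rw [hd]; simp [pvOuts, hc]
        · rw [if_neg h]
          have hd : decide (PySem.Int.mod cnt 2 = 0) = false := decide_eq_false h
          rw [hd]; simp [pvOuts, hc]
      have hcq : List.count '\'' (c :: l) = List.count '\'' l := by simp [List.count_cons, hc]
      by_cases h : PySem.Int.mod cnt 2 = 0
      · have hflag : pvFlagOf cnt = 1 := by unfold pvFlagOf; rw [if_pos h]
        rw [houts, if_pos h]
        by_cases e1 : c = '('
        · subst e1
          have step : countBracketLoop ('(' :: l) (m1, m2, m3, m4, m5, m6, pvFlagOf cnt, cnt)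
              = countBracketLoop l (m1 + 1, m2, m3, m4, m5, m6, pvFlagOf cnt, cnt) := by
            simp [countBracketLoop, hflag]
          rw [step, ih, hcq]; simp [List.count_cons]; ring
        · by_cases e2 : c = ')'
          · subst e2
            have step : countBracketLoop (')' :: l) (m1, m2, m3, m4, m5, m6, pvFlagOf cnt, cnt)
                = countBracketLoop l (m1, m2 + 1, m3, m4, m5, m6, pvFlagOf cnt, cnt) := by
              simp [countBracketLoop, hflag]
            rw [step, ih, hcq]; simp [List.count_cons]; ring
          · by_cases e3 : c = '['
            · subst e3
              have step : countBracketLoop ('[' :: l) (m1, m2, m3, m4, m5, m6, pvFlagOf cnt, cnt)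
                  = countBracketLoop l (m1, m2, m3 + 1, m4, m5, m6, pvFlagOf cnt, cnt) := by
                simp [countBracketLoop, hflag]
              rw [step, ih, hcq]; simp [List.count_cons]; ring
            · by_cases e4 : c = ']'
              · subst e4
                have step : countBracketLoop (']' :: l) (m1, m2, m3, m4, m5, m6, pvFlagOf cnt, cnt)
                    = countBracketLoop l (m1, m2, m3, m4 + 1, m5, m6, pvFlagOf cnt, cnt) := by
                  simp [countBracketLoop, hflag]
                rw [step, ih, hcq]; simp [List.count_cons]; ring
              · by_cases e5 : c = '{'
                · subst e5
                  have step : countBracketLoop ('{' :: l) (m1, m2, m3, m4, m5, m6, pvFlagOf cnt, cnt)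
                      = countBracketLoop l (m1, m2, m3, m4, m5 + 1, m6, pvFlagOf cnt, cnt) := by
                    simp [countBracketLoop, hflag]
                  rw [step, ih, hcq]; simp [List.count_cons]; ring
                · by_cases e6 : c = '}'
                  · subst e6
                    have step : countBracketLoop ('}' :: l) (m1, m2, m3, m4, m5, m6, pvFlagOf cnt, cnt)
                        = countBracketLoop l (m1, m2, m3, m4, m5, m6 + 1, pvFlagOf cnt, cnt) := by
                      simp [countBracketLoop, hflag]
                    rw [step, ih, hcq]; simp [List.count_cons]; ring
                  · have step : countBracketLoop (c :: l) (m1, m2, m3, m4, m5, m6, pvFlagOf cnt, cnt)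
                        = countBracketLoop l (m1, m2, m3, m4, m5, m6, pvFlagOf cnt, cnt) := by
                      simp [countBracketLoop, hflag, hc, e1, e2, e3, e4, e5, e6]
                    rw [step, ih, hcq]; simp [List.count_cons, e1, e2, e3, e4, e5, e6]
      · have hflag : pvFlagOf cnt = 0 := by unfold pvFlagOf; rw [if_neg h]
        have step : countBracketLoop (c :: l) (m1, m2, m3, m4, m5, m6, pvFlagOf cnt, cnt)
            = countBracketLoop l (m1, m2, m3, m4, m5, m6, pvFlagOf cnt, cnt) := by
          simp [countBracketLoop, hflag, hc]
        rw [houts, if_neg h, step, ih, hcq]; simp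

theorem countBracket_spec' (s : String) : countBracket s = countBracket_alt s := by
  have h1 : (pvEvery2 (s.toList.splitOnP (· == '\''))).flatten = pvOuts s.toList true :=
    (flatten_every2_splitOn s.toList).1
  have hsplit : s.toList.splitOn '\'' = s.toList.splitOnP (· == '\'') := rfl
  have h0 : (1 : Int) = pvFlagOf 0 := by decide
  have h2 := countBracketLoop_eq s.toList 0 0 0 0 0 0 0
  simp only [countBracket, countBracket_alt, hsplit, h1]
  rw [h0, h2]
  simp

-- ===== VERDICT (by name: the statement is the Claim_ definition above) =====
theorem countBracket_spec : Claim_equal_countBracket := by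
  intro s _
  unfold Spec_countBracket
  exact countBracket_spec' s
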